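-- pv_equiv track=rewrite | github.com/alsdn1360/BOJ_Python | 프로그래머스/3/42895. N으로 표현/N으로 표현.py | solution
-- ===== SOURCE A (Python) =====
-- def solution(N, number):
--     # 1개부터 8개까지의 N으로 만들 수 있는 모든 결과(집합) 저장 리스트
--     dp = [set() for _ in range(9)]
--
--     for i in range(1, 9):
--         # 이어붙인 숫자
--         dp[i].add(int(str(N) * i))
--
--         for j in range(1, i):
--             # 이전의 개수를 합쳐서 i개로 만들 수 있는 경우를 구함
--             for num1 in dp[j]:
--                 for num2 in dp[i - j]:
--                     # 사칙연산
--                     dp[i].add(num1 + num2)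
--                     dp[i].add(num1 - num2)
--                     dp[i].add(num1 * num2)
--
--                     if num2 != 0:
--                         dp[i].add(num1 // num2)
--
--         # 타겟이 dp의 i 인덱스에 있으면 N을 i번 사용한 것
--         if number in dp[i]:
--             return i
--
--     # dp 안에 없으면 최솟값이 8보다 크므로 -1
--     return -1
-- ===== SOURCE B (Python) =====
-- def solution(N, number):
--     # Top-down: reach(i) = the set of values formable with exactly i copies of N.
--     def combine(s1, s2):
--         out = set()
--         for a in s1:
--             for b in s2:
--                 out.add(a + b)
--                 out.add(a - b)
--                 out.add(a * b)
--                 if b != 0: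
--                     out.add(a // b)
--         return out
--
--     memo = {}
--
--     def reach(i):
--         if i not in memo:
--             vals = {int(str(N) * i)}
--             for j in range(1, i):
--                 vals |= combine(reach(j), reach(i - j))
--             memo[i] = vals
--         return memo[i]
--
--     for i in range(1, 9):
--         if number in reach(i):
--             return i
--     return -1
-- ===== Notes on version B (the rewrite author's own statement) =====
-- stated objective: alternative
-- what changed: Replaces the bottom-up dp array mutated in place by a top-down memoized recursion reach(i) with a separate combine(s1,s2) helper that builds each pair-product set and unions it in; Pre_ excludes N < 0 with number != N, where str(N)*i is unparseable and both implementations raise ValueError.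
import Mathlib
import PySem

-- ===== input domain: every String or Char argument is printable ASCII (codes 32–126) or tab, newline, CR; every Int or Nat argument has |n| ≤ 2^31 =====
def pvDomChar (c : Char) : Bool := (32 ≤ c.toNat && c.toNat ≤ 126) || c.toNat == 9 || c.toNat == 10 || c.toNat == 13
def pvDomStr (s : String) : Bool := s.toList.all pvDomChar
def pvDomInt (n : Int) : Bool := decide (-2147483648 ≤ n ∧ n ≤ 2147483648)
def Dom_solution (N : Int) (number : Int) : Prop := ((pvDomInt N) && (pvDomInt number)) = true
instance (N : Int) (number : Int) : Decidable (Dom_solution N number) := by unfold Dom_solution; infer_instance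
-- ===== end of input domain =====

-- B replaces A's bottom-up dp array mutated in place by a top-down memoized recursion
-- reach(i) with a combine helper; equal return value on Pre_ (objective: alternative).
-- Python's int sets are modelled by Std.TreeSet Int: the returned int depends only on set
-- MEMBERSHIP (a Python set's hash iteration order is not observable in it), which TreeSet
-- models exactly, and evaluation stays fast where the list model (PySem.Set) is quadratic.

-- int(str(N) * i); the .getD 0 branch is unreachable inside Pre_ (the parse succeeds there)
def pyConcat (N : Int) (i : Nat) : Int :=
  (PySem.Int.ofChars? ((List.replicate i (PySem.Int.toChars N)).flatten)).getD 0

-- ===== PORT A =====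
-- the body of iteration i: dp[i].add(int(str(N)*i)) then the triple nested loop adding the
-- four operation results; only dp[i] is ever mutated and j, i-j ≠ i, so the growing dp[i]
-- is threaded as the accumulator s and written back once (same reads, same final set)
def stepA (N : Int) (dp : List (Std.TreeSet Int)) (i : Nat) : Std.TreeSet Int :=
  (List.range' 1 (i - 1)).foldl
    (fun s j =>
      ((dp.getD j Std.TreeSet.empty).toList).foldl
        (fun s num1 =>
          ((dp.getD (i - j) Std.TreeSet.empty).toList).foldl
            (fun s num2 =>
              let s := s.insert (num1 + num2)
              let s := s.insert (num1 - num2)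
              let s := s.insert (num1 * num2)
              if num2 ≠ 0 then s.insert (PySem.Int.floordiv num1 num2) else s)
            s)
        s)
    ((dp.getD i Std.TreeSet.empty).insert (pyConcat N i))

-- for i in range(1, 9): … if number in dp[i]: return i; after the loop return -1
def loopA (N number : Int) (dp : List (Std.TreeSet Int)) : List Nat → Int
  | [] => -1
  | i :: rest =>
    let s := stepA N dp i
    if number ∈ s then (i : Int) else loopA N number (dp.set i s) rest

def solution (N : Int) (number : Int) : Int :=
  loopA N number (List.replicate 9 Std.TreeSet.empty) (List.range' 1 8)

-- ===== PORT B =====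
def combineB (s1 s2 : Std.TreeSet Int) : Std.TreeSet Int :=
  s1.toList.foldl
    (fun out a =>
      s2.toList.foldl
        (fun out b =>
          let out := out.insert (a + b)
          let out := out.insert (a - b)
          let out := out.insert (a * b)
          if b ≠ 0 then out.insert (PySem.Int.floordiv a b) else out)
        out)
    Std.TreeSet.empty

-- vals |= c  (set union, written as inserting c's elements)
def unionTS (vals c : Std.TreeSet Int) : Std.TreeSet Int :=
  c.toList.foldl (fun v x => v.insert x) vals

-- reach(i); the Python memo dict only caches, it does not change any value
def reachB (N : Int) (i : Nat) : Std.TreeSet Int :=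
  (List.range' 1 (i - 1)).attach.foldl
    (fun vals j => unionTS vals (combineB (reachB N j.1) (reachB N (i - j.1))))
    (Std.TreeSet.empty.insert (pyConcat N i))
termination_by i
decreasing_by
  all_goals (have := j.2; simp only [List.mem_range'_1] at this; omega)

def scanB (N number : Int) : List Nat → Int
  | [] => -1
  | i :: rest => if number ∈ reachB N i then (i : Int) else scanB N number rest

def solution_alt (N : Int) (number : Int) : Int :=
  scanB N number (List.range' 1 8)

-- ===== PRECONDITION & SPEC =====
-- When N < 0 and number ≠ N the loop reaches i = 2 and int(str(N)*2) (e.g. int("-5-5"))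
-- raises ValueError in A (and in B alike); Pre_ excludes exactly those inputs.
def Pre_solution (N : Int) (number : Int) : Prop := 0 ≤ N ∨ number = N
instance (N : Int) (number : Int) : Decidable (Pre_solution N number) := by
  unfold Pre_solution; infer_instance

def pvWitness_solution : Int × Int := (5, 12)

def Spec_solution (N : Int) (number : Int) (out : Int) : Prop := out = solution_alt N number
instance (N : Int) (number : Int) (out : Int) : Decidable (Spec_solution N number out) := by
  unfold Spec_solution; infer_instance

-- ===== CLAIM (what is proved, stated in full; the proofs are below) =====
def Claim_equal_solution : Prop := ∀ (N : Int) (number : Int), Dom_solution N number → Pre_solution N number → Spec_solution N number (solution N number)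

-- ===== LEMMAS AND PROOFS =====

-- the four values one (num1, num2) pair contributes
def OpVal (a b x : Int) : Prop :=
  x = a + b ∨ x = a - b ∨ x = a * b ∨ (b ≠ 0 ∧ x = PySem.Int.floordiv a b)

theorem mem_insertTS (t : Std.TreeSet Int) (a x : Int) :
    x ∈ t.insert a ↔ x ∈ t ∨ x = a := by
  simp [Std.TreeSet.mem_insert]; tauto

theorem mem_addOps (s : Std.TreeSet Int) (a b x : Int) :
    x ∈ (let s := s.insert (a + b)
         let s := s.insert (a - b)
         let s := s.insert (a * b)
         if b ≠ 0 then s.insert (PySem.Int.floordiv a b) else s)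
      ↔ x ∈ s ∨ OpVal a b x := by
  by_cases hb : b = 0 <;> simp [hb, OpVal] <;> tauto

theorem mem_foldl_ops (a : Int) (l2 : List Int) (s : Std.TreeSet Int) (x : Int) :
    x ∈ l2.foldl
        (fun s b =>
          let s := s.insert (a + b)
          let s := s.insert (a - b)
          let s := s.insert (a * b)
          if b ≠ 0 then s.insert (PySem.Int.floordiv a b) else s) s
      ↔ x ∈ s ∨ ∃ b ∈ l2, OpVal a b x := by
  induction l2 generalizing s with
  | nil => simp
  | cons b t ih => rw [List.foldl_cons, ih, mem_addOps]; simp [or_assoc]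

theorem mem_foldl_pairs (l1 l2 : List Int) (s : Std.TreeSet Int) (x : Int) :
    x ∈ l1.foldl
        (fun s a =>
          l2.foldl
            (fun s b =>
              let s := s.insert (a + b)
              let s := s.insert (a - b)
              let s := s.insert (a * b)
              if b ≠ 0 then s.insert (PySem.Int.floordiv a b) else s) s) s
      ↔ x ∈ s ∨ ∃ a ∈ l1, ∃ b ∈ l2, OpVal a b x := by
  induction l1 generalizing s with
  | nil => simp
  | cons a t ih => rw [List.foldl_cons, ih, mem_foldl_ops]; simp [or_assoc]

theorem mem_combineB (s1 s2 : Std.TreeSet Int) (x : Int) :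
    x ∈ combineB s1 s2 ↔ ∃ a ∈ s1, ∃ b ∈ s2, OpVal a b x := by
  unfold combineB; rw [mem_foldl_pairs]; simp

theorem mem_unionTS (vals c : Std.TreeSet Int) (x : Int) :
    x ∈ unionTS vals c ↔ x ∈ vals ∨ x ∈ c := by
  unfold unionTS
  rw [← Std.TreeSet.mem_toList (t := c)]
  generalize c.toList = l
  induction l generalizing vals with
  | nil => simp
  | cons y t ih => rw [List.foldl_cons, ih, mem_insertTS]; simp; tauto

theorem mem_foldl_union {γ : Type} (l : List γ) (g : γ → Std.TreeSet Int)
    (s : Std.TreeSet Int) (x : Int) :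
    x ∈ l.foldl (fun v c => unionTS v (g c)) s ↔ x ∈ s ∨ ∃ c ∈ l, x ∈ g c := by
  induction l generalizing s with
  | nil => simp
  | cons c t ih => rw [List.foldl_cons, ih, mem_unionTS]; simp [or_assoc]

theorem mem_reachB (N : Int) (i : Nat) (x : Int) :
    x ∈ reachB N i ↔ x = pyConcat N i ∨
      ∃ j ∈ List.range' 1 (i - 1), ∃ a ∈ reachB N j, ∃ b ∈ reachB N (i - j), OpVal a b x := by
  rw [reachB, mem_foldl_union]
  simp [mem_combineB]
  exact or_congr eq_comm Iff.rfl

theorem mem_foldA (dp : List (Std.TreeSet Int)) (i : Nat) (lj : List Nat)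
    (s : Std.TreeSet Int) (x : Int) :
    x ∈ lj.foldl
        (fun s j =>
          ((dp.getD j Std.TreeSet.empty).toList).foldl
            (fun s num1 =>
              ((dp.getD (i - j) Std.TreeSet.empty).toList).foldl
                (fun s num2 =>
                  let s := s.insert (num1 + num2)
                  let s := s.insert (num1 - num2)
                  let s := s.insert (num1 * num2)
                  if num2 ≠ 0 then s.insert (PySem.Int.floordiv num1 num2) else s)
                s)
            s) s
      ↔ x ∈ s ∨ ∃ j ∈ lj, ∃ a ∈ dp.getD j Std.TreeSet.empty,
            ∃ b ∈ dp.getD (i - j) Std.TreeSet.empty, OpVal a b x := by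
  induction lj generalizing s with
  | nil => simp
  | cons j t ih => rw [List.foldl_cons, ih, mem_foldl_pairs]; simp [or_assoc]

theorem mem_stepA (N : Int) (dp : List (Std.TreeSet Int)) (i : Nat) (x : Int) :
    x ∈ stepA N dp i ↔ (x ∈ dp.getD i Std.TreeSet.empty ∨ x = pyConcat N i) ∨
      ∃ j ∈ List.range' 1 (i - 1), ∃ a ∈ dp.getD j Std.TreeSet.empty,
        ∃ b ∈ dp.getD (i - j) Std.TreeSet.empty, OpVal a b x := by
  unfold stepA; rw [mem_foldA, mem_insertTS]

-- invariant carried through A's loop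
def InvA (N : Int) (dp : List (Std.TreeSet Int)) (i : Nat) : Prop :=
  dp.length = 9 ∧
  (∀ j, 1 ≤ j → j < i → ∀ x, x ∈ dp.getD j Std.TreeSet.empty ↔ x ∈ reachB N j) ∧
  (∀ k, i ≤ k → ∀ x, x ∉ dp.getD k Std.TreeSet.empty)

theorem step_eq (N : Int) (dp : List (Std.TreeSet Int)) (i : Nat)
    (h1 : ∀ j, 1 ≤ j → j < i → ∀ x, x ∈ dp.getD j Std.TreeSet.empty ↔ x ∈ reachB N j)
    (h2 : ∀ x, x ∉ dp.getD i Std.TreeSet.empty) (x : Int) :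
    x ∈ stepA N dp i ↔ x ∈ reachB N i := by
  rw [mem_stepA, mem_reachB]
  simp only [h2 x, false_or]
  constructor
  · rintro (h | ⟨j, hj, a, ha, b, hb, hop⟩)
    · exact Or.inl h
    · have hj' := hj; simp only [List.mem_range'_1] at hj'
      exact Or.inr ⟨j, hj, a, (h1 j (by omega) (by omega) a).1 ha,
        b, (h1 (i - j) (by omega) (by omega) b).1 hb, hop⟩
  · rintro (h | ⟨j, hj, a, ha, b, hb, hop⟩)
    · exact Or.inl h
    · have hj' := hj; simp only [List.mem_range'_1] at hj'
      exact Or.inr ⟨j, hj, a, (h1 j (by omega) (by omega) a).2 ha,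
        b, (h1 (i - j) (by omega) (by omega) b).2 hb, hop⟩

theorem getD_set_self (dp : List (Std.TreeSet Int)) (i : Nat) (s : Std.TreeSet Int)
    (h : i < dp.length) : (dp.set i s).getD i Std.TreeSet.empty = s := by
  simp [List.getD_eq_getElem?_getD, h]

theorem getD_set_ne (dp : List (Std.TreeSet Int)) (i j : Nat) (s : Std.TreeSet Int)
    (h : j ≠ i) : (dp.set i s).getD j Std.TreeSet.empty = dp.getD j Std.TreeSet.empty := by
  simp [List.getD_eq_getElem?_getD, List.getElem?_set_ne (by omega : i ≠ j)]

theorem loop_eq (N number : Int) : ∀ (n i : Nat) (dp : List (Std.TreeSet Int)),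
    1 ≤ i → i + n ≤ 9 → InvA N dp i →
    loopA N number dp (List.range' i n) = scanB N number (List.range' i n) := by
  intro n
  induction n with
  | zero => intro i dp _ _ _; rfl
  | succ m ih =>
    intro i dp hi hn hInv
    obtain ⟨hlen, h1, h2⟩ := hInv
    rw [List.range'_succ]
    have hs := step_eq N dp i h1 (h2 i le_rfl)
    by_cases hmem : number ∈ reachB N i
    · rw [loopA, scanB, if_pos ((hs number).2 hmem), if_pos hmem]
    · rw [loopA, scanB, if_neg (fun h => hmem ((hs number).1 h)), if_neg hmem]
      apply ih (i + 1) _ (by omega) (by omega)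
      refine ⟨by simpa using hlen, ?_, ?_⟩
      · intro j hj1 hj2 x
        by_cases hji : j = i
        · subst hji
          rw [getD_set_self dp j _ (by omega)]
          exact hs x
        · rw [getD_set_ne dp i j _ hji]
          exact h1 j hj1 (by omega) x
      · intro k hk x
        rw [getD_set_ne dp i k _ (by omega)]
        exact h2 k (by omega) x

theorem solution_eq (N number : Int) : solution N number = solution_alt N number := by
  unfold solution solution_alt
  apply loop_eq N number 8 1 _ (by omega) (by omega)
  refine ⟨by simp, by omega, ?_⟩
  intro k _ x
  rcases Nat.lt_or_ge k 9 with hk | hk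
  · rw [List.getD_eq_getElem?_getD, List.getElem?_replicate]; simp [hk]
  · rw [List.getD_eq_getElem?_getD, List.getElem?_eq_none (by simpa using hk)]; simp

-- ===== VERDICT (by name: the statement is the Claim_ definition above) =====
theorem solution_spec : Claim_equal_solution := by
  intro N number _ _
  unfold Spec_solution
  exact solution_eq N number
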